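-- pv_equiv track=rewrite | github.com/hjjunl/Algorithm | programmers_모의고사.py | solution
-- ===== SOURCE A (Python) =====
-- def solution(answers):
--     answer = []
--     arr1=[ 1, 2, 3, 4, 5]
--     arr2=[2, 1, 2, 3, 2, 4, 2, 5]
--     arr3=[3, 3, 1, 1, 2, 2, 4, 4, 5, 5]
--     count=[0,0,0]
--     for idx, an in enumerate(answers):
--         if an==arr1[idx%len(arr1)]:
--             count[0]+=1
--         if an==arr2[idx%len(arr2)]:
--             count[1]+=1
--         if an==arr3[idx%len(arr3)]:
--             count[2]+=1
--
--     for i, a in enumerate(count):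
--         if max(count)==a:
--             answer.append(i+1)
--     return answer
-- ===== SOURCE B (Python) =====
-- from collections import Counter
--
-- def solution(answers):
--     patterns = [[1, 2, 3, 4, 5],
--                 [2, 1, 2, 3, 2, 4, 2, 5],
--                 [3, 3, 1, 1, 2, 2, 4, 4, 5, 5]]
--     # 40 = lcm(5, 8, 10): position i mod 40 determines every pattern's guess at i.
--     hist = Counter((i % 40, a) for i, a in enumerate(answers))
--     counts = [sum(c for (r, a), c in hist.items() if a == p[r % len(p)])
--               for p in patterns]
--     best = max(counts)
--     return [i + 1 for i, c in enumerate(counts) if c == best]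
-- ===== Notes on version B (the rewrite author's own statement) =====
-- stated objective: alternative
-- what changed: Replaces A's per-element pass that tests every pattern with three mutable counters by building a histogram (Counter) keyed by (index mod 40, answer) in one pass -- 40 = lcm of the pattern lengths -- and then computing each pattern's score as a sum over the (at most 40*#values) histogram entries, followed by a max-filter over the three scores.
import Mathlib
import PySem

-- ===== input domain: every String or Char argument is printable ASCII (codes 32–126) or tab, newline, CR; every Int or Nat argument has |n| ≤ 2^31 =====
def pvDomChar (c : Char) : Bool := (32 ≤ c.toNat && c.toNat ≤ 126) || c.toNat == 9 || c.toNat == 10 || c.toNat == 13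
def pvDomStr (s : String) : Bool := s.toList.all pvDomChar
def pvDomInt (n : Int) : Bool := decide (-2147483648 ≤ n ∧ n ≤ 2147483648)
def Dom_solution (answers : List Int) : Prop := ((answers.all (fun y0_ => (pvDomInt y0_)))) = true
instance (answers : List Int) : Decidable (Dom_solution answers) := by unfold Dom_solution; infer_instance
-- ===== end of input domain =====

-- B replaces A's per-element three-counter pass by a one-pass histogram keyed by (index mod 40, answer)
-- (40 = lcm of the pattern lengths) from which each pattern's score is summed; objective: alternative.

-- ===== PORT A =====
-- loop body of A's counting pass (count[j] += 1 when the answer matches taker j's pattern at idx % len)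
def aCountStep (arr1 arr2 arr3 : List Int) (c : List Int) (p : Int × Int) : List Int :=
  let c := if p.2 = PySem.List.pyGetD arr1 (PySem.Int.mod p.1 (arr1.length : Int)) 0 then
             c.set 0 (c.getD 0 0 + 1) else c
  let c := if p.2 = PySem.List.pyGetD arr2 (PySem.Int.mod p.1 (arr2.length : Int)) 0 then
             c.set 1 (c.getD 1 0 + 1) else c
  if p.2 = PySem.List.pyGetD arr3 (PySem.Int.mod p.1 (arr3.length : Int)) 0 then
    c.set 2 (c.getD 2 0 + 1) else c

def solution (answers : List Int) : List Int :=
  let arr1 : List Int := [1, 2, 3, 4, 5]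
  let arr2 : List Int := [2, 1, 2, 3, 2, 4, 2, 5]
  let arr3 : List Int := [3, 3, 1, 1, 2, 2, 4, 4, 5, 5]
  let count : List Int :=
    (PySem.List.enumerate answers 0).foldl (aCountStep arr1 arr2 arr3) [0, 0, 0]
  (PySem.List.enumerate count 0).foldl (fun ans p =>
      if (PySem.List.max? count (fun x => x)).getD 0 = p.2 then ans ++ [p.1 + 1] else ans) []

-- ===== PORT B =====
-- Counter((i % 40, a) for i, a in enumerate(answers))
def bHist (answers : List Int) : PySem.Dict (Int × Int) Int :=
  PySem.Dict.counter ((PySem.List.enumerate answers 0).map (fun ia => (PySem.Int.mod ia.1 40, ia.2)))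

-- sum(c for (r, a), c in hist.items() if a == p[r % len(p)])
def bScore (hist : PySem.Dict (Int × Int) Int) (p : List Int) : Int :=
  (((PySem.Dict.items hist).filter
      (fun kv => kv.1.2 == PySem.List.pyGetD p (PySem.Int.mod kv.1.1 (p.length : Int)) 0)).map
    (fun kv => kv.2)).sum

def solution_alt (answers : List Int) : List Int :=
  let patterns : List (List Int) :=
    [[1, 2, 3, 4, 5], [2, 1, 2, 3, 2, 4, 2, 5], [3, 3, 1, 1, 2, 2, 4, 4, 5, 5]]
  let hist := bHist answers
  let counts : List Int := patterns.map (fun p => bScore hist p)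
  let best : Int := (PySem.List.max? counts (fun x => x)).getD 0
  ((PySem.List.enumerate counts 0).filter (fun ic => ic.2 == best)).map (fun ic => ic.1 + 1)

-- ===== PRECONDITION & SPEC =====
def Spec_solution (answers : List Int) (out : List Int) : Prop := out = solution_alt answers
instance (answers : List Int) (out : List Int) : Decidable (Spec_solution answers out) := by unfold Spec_solution; infer_instance

-- ===== CLAIM (what is proved, stated in full; the proofs are below) =====
def Claim_equal_solution : Prop := ∀ (answers : List Int), Dom_solution answers → Spec_solution answers (solution answers)

-- ===== LEMMAS AND PROOFS =====

-- proof-side characterisation: score of one pattern via the absolute index (A's view)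
def idxScore (ans : List Int) (i : Nat) (arr : List Int) : Int :=
  match ans with
  | [] => 0
  | a :: rest =>
      (if a = arr.getD (i % arr.length) 0 then 1 else 0) + idxScore rest (i + 1) arr

-- value of one step of A's counting loop on a concrete 3-state
theorem aCountStep_eval (arr1 arr2 arr3 : List Int)
    (l1 : 0 < arr1.length) (l2 : 0 < arr2.length) (l3 : 0 < arr3.length)
    (i : Nat) (a c0 c1 c2 : Int) :
    aCountStep arr1 arr2 arr3 [c0, c1, c2] ((i : Int), a) =
      [c0 + (if a = arr1.getD (i % arr1.length) 0 then 1 else 0),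
       c1 + (if a = arr2.getD (i % arr2.length) 0 then 1 else 0),
       c2 + (if a = arr3.getD (i % arr3.length) 0 then 1 else 0)] := by
  have key : ∀ (arr : List Int), 0 < arr.length →
      PySem.List.pyGetD arr (PySem.Int.mod (i : Int) (arr.length : Int)) 0
        = arr.getD (i % arr.length) 0 := by
    intro arr hl
    rw [PySem.Int.mod_eq_emod_of_pos (by exact_mod_cast hl)]
    rw [show ((i : Int) % (arr.length : Int)) = ((i % arr.length : Nat) : Int) from
      (Int.natCast_mod i arr.length).symm, PySem.List.pyGetD_natCast]
  unfold aCountStep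
  simp only [key arr1 l1, key arr2 l2, key arr3 l3]
  split_ifs <;> simp [List.set, List.getD]

-- A's counting fold computes the three idxScores
theorem foldA_eq (arr1 arr2 arr3 : List Int)
    (h1 : arr1 ≠ []) (h2 : arr2 ≠ []) (h3 : arr3 ≠ []) (ans : List Int) :
    ∀ (i : Nat) (c0 c1 c2 : Int),
    (PySem.List.enumerate ans (i : Int)).foldl (aCountStep arr1 arr2 arr3) [c0, c1, c2]
    = [c0 + idxScore ans i arr1, c1 + idxScore ans i arr2, c2 + idxScore ans i arr3] := by
  induction ans with
  | nil => intro i c0 c1 c2; simp [idxScore, PySem.List.enumerate_nil]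
  | cons a rest ih =>
    intro i c0 c1 c2
    have l1 : 0 < arr1.length := List.length_pos_iff.mpr h1
    have l2 : 0 < arr2.length := List.length_pos_iff.mpr h2
    have l3 : 0 < arr3.length := List.length_pos_iff.mpr h3
    rw [PySem.List.enumerate_cons, List.foldl_cons,
      aCountStep_eval arr1 arr2 arr3 l1 l2 l3 i a c0 c1 c2,
      show (i : Int) + 1 = ((i + 1 : Nat) : Int) by push_cast; ring,
      ih (i + 1)]
    simp only [idxScore, List.cons.injEq, and_true]
    refine ⟨by ring, by ring, by ring⟩

-- sum over the filtered items of a (key, weight)-map = sum of guarded weights over the keys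
theorem sum_filter_map_pair {K : Type} (l : List K) (pred : K → Bool) (c : K → Int) :
    (((l.map (fun k => (k, c k))).filter (fun kv => pred kv.1)).map (fun kv => kv.2)).sum
      = (l.map (fun k => if pred k then c k else 0)).sum := by
  induction l with
  | nil => simp
  | cons k l ih =>
    simp only [List.map_cons, List.filter_cons]
    by_cases h : pred k = true
    · simp [h, ih]
    · simp [h, ih]

-- sum of an indicator-weighted map over a nodup list hits exactly the x-term
theorem sum_indicator {K : Type} [BEq K] [LawfulBEq K] (g : K → Int) :
    ∀ (l : List K) (x : K), l.Nodup → x ∈ l →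
    (l.map (fun k => if k == x then g k else 0)).sum = g x := by
  intro l
  induction l with
  | nil => intro x _ hx; simp at hx
  | cons k l ih =>
    intro x hnd hx
    rcases List.nodup_cons.mp hnd with ⟨hkl, hndl⟩
    simp only [List.map_cons, List.sum_cons]
    by_cases hkx : k = x
    · subst hkx
      have : (l.map (fun k' => if k' == k then g k' else 0)).sum = 0 := by
        apply List.sum_eq_zero
        intro y hy
        rcases List.mem_map.mp hy with ⟨k', hk', rfl⟩
        have hne : k' ≠ k := fun h => hkl (h ▸ hk')
        simp [hne]
      simp [this]
    · have hx' : x ∈ l := by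
        rcases List.mem_cons.mp hx with h | h
        · exact absurd h.symm hkx
        · exact h
      have hb : ¬ (k == x) = true := by simpa using hkx
      rw [if_neg hb, ih x hndl hx', zero_add]

-- over a nodup key list covering xs, the guarded counts sum to countP
theorem sum_guarded_counts {K : Type} [BEq K] [LawfulBEq K] (pred : K → Bool) (l : List K)
    (hnd : l.Nodup) :
    ∀ (xs : List K), (∀ x ∈ xs, x ∈ l) →
    (l.map (fun k => if pred k then (xs.count k : Int) else 0)).sum
      = (xs.countP pred : Int) := by
  intro xs
  induction xs with
  | nil => intro _; simp
  | cons x rest ih =>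
    intro hcov
    have hxl : x ∈ l := hcov x List.mem_cons_self
    have hcov' : ∀ y ∈ rest, y ∈ l := fun y hy => hcov y (List.mem_cons_of_mem x hy)
    have hterm : ∀ k, (if pred k then ((x :: rest).count k : Int) else 0)
        = (if pred k then (rest.count k : Int) else 0)
          + (if k == x then (if pred k then 1 else 0) else 0) := by
      intro k
      rw [List.count_cons]
      by_cases hk : k = x
      · subst hk
        by_cases hp : pred k = true <;> simp [hp]
      · have hb : ¬ (k == x) = true := by simpa using hk
        have hxk : ¬ x = k := fun h => hk h.symm
        by_cases hp : pred k = true <;> simp [hp, hb, hxk]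
    calc (l.map (fun k => if pred k then ((x :: rest).count k : Int) else 0)).sum
        = (l.map (fun k => (if pred k then (rest.count k : Int) else 0)
            + (if k == x then (if pred k then 1 else 0) else 0))).sum := by
          congr 1; exact List.map_congr_left (fun k _ => hterm k)
      _ = (l.map (fun k => if pred k then (rest.count k : Int) else 0)).sum
            + (l.map (fun k => if k == x then (if pred k then 1 else 0) else 0)).sum := by
          rw [← List.sum_map_add]
      _ = ((rest.countP pred : Int)) + (if pred x then 1 else 0) := by
          rw [ih hcov', sum_indicator (fun k => if pred k then 1 else 0) l x hnd hxl]
      _ = ((x :: rest).countP pred : Int) := by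
          rw [List.countP_cons]
          by_cases hp : pred x = true <;> simp [hp]

-- the histogram predicate counted over the enumeration is idxScore (uses p.length ∣ 40)
theorem countP_enum (p : List Int) (hp : p ≠ []) (hd : p.length ∣ 40) (ans : List Int) :
    ∀ i : Nat, ((PySem.List.enumerate ans (i : Int)).countP
      (fun ia => ia.2 == PySem.List.pyGetD p
        (PySem.Int.mod (PySem.Int.mod ia.1 40) (p.length : Int)) 0) : Int)
    = idxScore ans i p := by
  induction ans with
  | nil => intro i; simp [PySem.List.enumerate_nil, idxScore]
  | cons a rest ih =>
    intro i
    have hl : 0 < p.length := List.length_pos_iff.mpr hp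
    have hidx : PySem.List.pyGetD p (PySem.Int.mod (PySem.Int.mod (i : Int) 40) (p.length : Int)) 0
        = p.getD (i % p.length) 0 := by
      rw [show PySem.Int.mod (i : Int) 40 = ((i % 40 : Nat) : Int) by
            exact_mod_cast PySem.Int.mod_natCast i 40,
          show PySem.Int.mod ((i % 40 : Nat) : Int) ((p.length : Nat) : Int)
              = ((i % 40 % p.length : Nat) : Int) from PySem.Int.mod_natCast _ _,
          Nat.mod_mod_of_dvd i hd, PySem.List.pyGetD_natCast]
    rw [PySem.List.enumerate_cons, List.countP_cons,
      show (i : Int) + 1 = ((i + 1 : Nat) : Int) by push_cast; ring]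
    rw [Nat.cast_add, ih (i + 1)]
    simp only [idxScore, hidx, beq_iff_eq]
    by_cases h : a = p.getD (i % p.length) 0 <;> simp [h] <;> ring

-- B's histogram score of one pattern is idxScore
theorem bScore_eq (answers p : List Int) (hp : p ≠ []) (hd : p.length ∣ 40) :
    bScore (bHist answers) p = idxScore answers 0 p := by
  unfold bScore bHist
  rw [PySem.Dict.items_counter]
  set keys := (PySem.List.enumerate answers 0).map (fun ia => (PySem.Int.mod ia.1 40, ia.2)) with hkeys
  rw [sum_filter_map_pair (PySem.Set.ofList keys)
      (fun k => k.2 == PySem.List.pyGetD p (PySem.Int.mod k.1 (p.length : Int)) 0)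
      (fun k => (keys.count k : Int)),
    sum_guarded_counts
      (fun k => k.2 == PySem.List.pyGetD p (PySem.Int.mod k.1 (p.length : Int)) 0)
      (PySem.Set.ofList keys) (PySem.Set.nodup_ofList keys) keys
      (fun x hx => (PySem.Set.mem_ofList keys x).mpr hx)]
  rw [hkeys, List.countP_map]
  have := countP_enum p hp hd answers 0
  simpa using this

-- ===== VERDICT (by name: the statement is the Claim_ definition above) =====
theorem solution_spec : Claim_equal_solution := by
  intro answers _
  show solution answers = solution_alt answers
  simp only [solution, solution_alt]
  have hA := foldA_eq [1,2,3,4,5] [2,1,2,3,2,4,2,5] [3,3,1,1,2,2,4,4,5,5]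
    (by simp) (by simp) (by simp) answers 0 0 0 0
  simp only [Nat.cast_zero, zero_add] at hA
  rw [hA]
  clear hA
  simp only [List.map_cons, List.map_nil]
  rw [bScore_eq answers [1,2,3,4,5] (by simp) (by decide),
      bScore_eq answers [2,1,2,3,2,4,2,5] (by simp) (by decide),
      bScore_eq answers [3,3,1,1,2,2,4,4,5,5] (by simp) (by decide)]
  simp only [PySem.List.enumerate_cons, PySem.List.enumerate_nil, List.foldl_cons,
    List.foldl_nil, List.filter_cons, List.filter_nil, eq_comm]
  generalize idxScore answers 0 [1,2,3,4,5] = s1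
  generalize idxScore answers 0 [2,1,2,3,2,4,2,5] = s2
  generalize idxScore answers 0 [3,3,1,1,2,2,4,4,5,5] = s3
  generalize (PySem.List.max? [s1, s2, s3] fun x => x).getD 0 = m
  by_cases c1 : s1 = m <;> by_cases c2 : s2 = m <;> by_cases c3 : s3 = m <;>
    simp [c1, c2, c3]
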